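-- pv_equiv track=rewrite | github.com/TravisWheelerLab/disco | disco/plots/accuracy_metrics.py | get_sound_event_indices
-- ===== SOURCE A (Python) =====
-- def get_sound_event_indices(ground_truth):
--     n_events = (
--         1  # note that n_events needs to start at 1 to count the first label as a chunk.
--     )
--     sound_event_indices = [
--         0
--     ]  # here, we keep track of where these sound events start and stop
--     # (and manually record that the first sound starts at index 0).
--     for i in range(len(ground_truth) - 1):
--         current_label = ground_truth[i]
--         next_label = ground_truth[i + 1]
--         if current_label != next_label:
--             n_events = n_events + 1
--             sound_event_indices.append(i + 1)
--     return sound_event_indices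
-- ===== SOURCE B (Python) =====
-- def get_sound_event_indices(ground_truth):
--     # Phase 1: run-length encode consecutive equal labels.
--     lengths = []
--     run = 0
--     prev = None
--     for label in ground_truth:
--         if run and label == prev:
--             run += 1
--         else:
--             if run:
--                 lengths.append(run)
--             run = 1
--             prev = label
--     if run:
--         lengths.append(run)
--     # Phase 2: starts are the prefix sums of all but the last run length.
--     starts = [0]
--     total = 0
--     for l in lengths[:-1]:
--         total += l
--         starts.append(total)
--     return starts
-- ===== Notes on version B (the rewrite author's own statement) =====
-- stated objective: alternative
-- what changed: Replaces A's pairwise boundary-detection scan over adjacent index pairs with a two-phase computation: run-length-encode the consecutive equal labels, then return the zero start index followed by the prefix sums of all but the last run length.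
import Mathlib
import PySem

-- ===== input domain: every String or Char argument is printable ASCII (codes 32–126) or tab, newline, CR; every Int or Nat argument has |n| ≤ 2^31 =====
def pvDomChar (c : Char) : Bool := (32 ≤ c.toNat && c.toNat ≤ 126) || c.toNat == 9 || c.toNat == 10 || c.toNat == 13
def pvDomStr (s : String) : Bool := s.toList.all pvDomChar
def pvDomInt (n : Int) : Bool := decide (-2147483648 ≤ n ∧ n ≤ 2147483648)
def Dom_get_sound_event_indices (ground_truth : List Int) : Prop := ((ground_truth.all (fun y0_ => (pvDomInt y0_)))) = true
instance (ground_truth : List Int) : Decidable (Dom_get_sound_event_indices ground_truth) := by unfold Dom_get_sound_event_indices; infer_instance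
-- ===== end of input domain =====

-- B replaces A's pairwise boundary scan by a two-phase run-length-encode + prefix-sum computation (objective: alternative decomposition, same cost).

-- ===== PORT A =====
def get_sound_event_indices (ground_truth : List Int) : List Int :=
  -- for i in range(len(ground_truth) - 1): …  carrying (n_events, sound_event_indices)
  (((PySem.List.pyRange 0 ((ground_truth.length : Int) - 1) 1).foldl
      (fun (st : Int × List Int) i =>
        let current_label := PySem.List.pyGetD ground_truth i 0
        let next_label := PySem.List.pyGetD ground_truth (i + 1) 0
        if current_label ≠ next_label then (st.1 + 1, st.2 ++ [i + 1]) else st)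
      (1, [0]))).2

-- ===== PORT B =====
-- run-length encoding: current run of label x has count cnt; emit on label change
def pvRunLens (x : Int) (cnt : Int) : List Int → List Int
  | [] => [cnt]
  | y :: ys => if y = x then pvRunLens x (cnt + 1) ys else cnt :: pvRunLens y 1 ys

-- prefix sums starting from total s
def pvPrefixSums (s : Int) : List Int → List Int
  | [] => []
  | l :: ls => (s + l) :: pvPrefixSums (s + l) ls

def get_sound_event_indices_alt (ground_truth : List Int) : List Int :=
  match ground_truth with
  | [] => [0]
  | x :: xs => 0 :: pvPrefixSums 0 ((pvRunLens x 1 xs).dropLast)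

-- ===== PRECONDITION & SPEC =====
def Spec_get_sound_event_indices (ground_truth : List Int) (out : List Int) : Prop := out = get_sound_event_indices_alt ground_truth
instance (ground_truth : List Int) (out : List Int) : Decidable (Spec_get_sound_event_indices ground_truth out) := by unfold Spec_get_sound_event_indices; infer_instance

-- ===== CLAIM (what is proved, stated in full; the proofs are below) =====
def Claim_equal_get_sound_event_indices : Prop := ∀ (ground_truth : List Int), Dom_get_sound_event_indices ground_truth → Spec_get_sound_event_indices ground_truth (get_sound_event_indices ground_truth)

-- ===== LEMMAS AND PROOFS =====

-- proof-side characterisation: 0-based positions k with gt[k] ≠ gt[k+1]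
def pvBnd : List Int → List Nat
  | [] => []
  | [_] => []
  | x :: y :: ys => if x ≠ y then 0 :: (pvBnd (y :: ys)).map (· + 1) else (pvBnd (y :: ys)).map (· + 1)

-- drop the n_events component of A's fold state
theorem pvSndFold (l : List Int) (p : Int → Prop) [DecidablePred p] :
    ∀ (c : Int) (acc : List Int),
      ((l.foldl (fun (st : Int × List Int) i =>
          if p i then (st.1 + 1, st.2 ++ [i + 1]) else st) (c, acc))).2
      = l.foldl (fun a i => if p i then a ++ [i + 1] else a) acc := by
  induction l with
  | nil => intro c acc; rfl
  | cons h t ih =>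
      intro c acc
      simp only [List.foldl_cons]
      by_cases hp : p h <;> simp [hp, ih]

-- fold with conditional append = filter-then-map
theorem pvFoldFilter (l : List Nat) (p : Nat → Prop) [DecidablePred p] (f : Nat → Int) :
    ∀ (acc : List Int),
      l.foldl (fun a k => if p k then a ++ [f k] else a) acc
      = acc ++ (l.filter (fun k => decide (p k))).map f := by
  induction l with
  | nil => intro acc; simp
  | cons h t ih =>
      intro acc
      by_cases hp : p h <;> simp [hp, ih]

theorem pvRunLens_ne_nil (x c : Int) (ys : List Int) : pvRunLens x c ys ≠ [] := by
  induction ys generalizing x c with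
  | nil => simp [pvRunLens]
  | cons y ys ih =>
      simp only [pvRunLens]
      split <;> simp [ih]

-- B side: prefix sums of the run lengths are the boundary positions
theorem pvAltBnd (ys : List Int) : ∀ (x : Int) (c s : Int),
    pvPrefixSums s ((pvRunLens x c ys).dropLast)
      = (pvBnd (x :: ys)).map (fun (k : Nat) => (k : Int) + (s + c)) := by
  induction ys with
  | nil => intro x c s; simp [pvRunLens, pvPrefixSums, pvBnd]
  | cons y ys ih =>
      intro x c s
      by_cases hxy : y = x
      · subst hxy
        have h0 : pvRunLens y c (y :: ys) = pvRunLens y (c + 1) ys := by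
          simp [pvRunLens]
        have h1 : pvBnd (y :: y :: ys) = (pvBnd (y :: ys)).map (· + 1) := by
          simp [pvBnd]
        rw [h0, ih y (c + 1) s, h1, List.map_map]
        apply List.map_congr_left
        intro k _
        simp only [Function.comp_apply]
        push_cast
        ring
      · have h0 : pvRunLens x c (y :: ys) = c :: pvRunLens y 1 ys := by
          simp [pvRunLens, hxy]
        have hne : x ≠ y := fun h => hxy h.symm
        have h1 : pvBnd (x :: y :: ys) = 0 :: (pvBnd (y :: ys)).map (· + 1) := by
          simp [pvBnd, hne]
        rw [h0, List.dropLast_cons_of_ne_nil (pvRunLens_ne_nil y 1 ys)]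
        simp only [pvPrefixSums]
        rw [ih y 1 (s + c), h1, List.map_cons, List.map_map]
        congr 1
        · push_cast; ring
        · apply List.map_congr_left
          intro k _
          simp only [Function.comp_apply]
          push_cast
          ring

-- A side: the filtered index range is pvBnd
theorem pvFilterBnd (gt : List Int) :
    (List.range (gt.length - 1)).filter
        (fun k => decide (gt.getD k 0 ≠ gt.getD (k + 1) 0))
      = pvBnd gt := by
  induction gt with
  | nil => simp [pvBnd]
  | cons x t ih =>
      cases t with
      | nil => simp [pvBnd]
      | cons y ys =>
          have hstep : List.range ((x :: y :: ys).length - 1)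
              = 0 :: (List.range ((y :: ys).length - 1)).map Nat.succ := by
            simp [List.range_succ_eq_map]
          rw [hstep, List.filter_cons, List.filter_map]
          have hpred : (List.range ((y :: ys).length - 1)).filter
              ((fun k => decide ((x :: y :: ys).getD k 0 ≠ (x :: y :: ys).getD (k + 1) 0)) ∘ Nat.succ)
              = pvBnd (y :: ys) := by
            rw [← ih]
            apply List.filter_congr
            intro k _
            simp [Function.comp, Nat.succ_eq_add_one]
          rw [hpred]
          have hmap : (pvBnd (y :: ys)).map Nat.succ = (pvBnd (y :: ys)).map (· + 1) := by
            apply List.map_congr_left; intro k _; rfl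
          by_cases hxy : x = y
          · have hd : decide ((x :: y :: ys).getD 0 0 ≠ (x :: y :: ys).getD (0 + 1) 0) = false := by
              simp [hxy]
            have hb : pvBnd (x :: y :: ys) = (pvBnd (y :: ys)).map (· + 1) := by
              simp [pvBnd, hxy]
            rw [hd, if_neg (by simp), hb, hmap]
          · have hd : decide ((x :: y :: ys).getD 0 0 ≠ (x :: y :: ys).getD (0 + 1) 0) = true := by
              simp [hxy]
            have hb : pvBnd (x :: y :: ys) = 0 :: (pvBnd (y :: ys)).map (· + 1) := by
              simp [pvBnd, hxy]
            rw [hd, if_pos rfl, hb, hmap]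

theorem pvA_eq (gt : List Int) :
    get_sound_event_indices gt = 0 :: (pvBnd gt).map (fun (k : Nat) => (k : Int) + 1) := by
  unfold get_sound_event_indices
  rw [pvSndFold _ (fun i => PySem.List.pyGetD gt i 0 ≠ PySem.List.pyGetD gt (i + 1) 0)]
  rw [PySem.List.pyRange_one, List.foldl_map]
  have h1 : ((gt.length : Int) - 1 - 0).toNat = gt.length - 1 := by omega
  rw [h1]
  rw [PySem.List.foldl_congr_mem (List.range (gt.length - 1)) _
      (fun a k => if gt.getD k 0 ≠ gt.getD (k + 1) 0 then a ++ [(k : Int) + 1] else a) [0]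
      (by
        intro a k _
        have hcond : PySem.List.pyGetD gt ((0 : Int) + (k : Int)) 0 = gt.getD k 0 := by
          rw [zero_add, PySem.List.pyGetD_natCast]
        have hcond2 : PySem.List.pyGetD gt ((0 : Int) + (k : Int) + 1) 0 = gt.getD (k + 1) 0 := by
          have h : ((0 : Int) + (k : Int) + 1) = ((k + 1 : Nat) : Int) := by push_cast; ring
          rw [h, PySem.List.pyGetD_natCast]
        have hval : ((0 : Int) + (k : Int) + 1) = ((k : Int) + 1) := by ring
        rw [hcond, hcond2, hval])]
  rw [pvFoldFilter _ (fun k => gt.getD k 0 ≠ gt.getD (k + 1) 0) (fun k => (k : Int) + 1)]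
  rw [pvFilterBnd]
  simp

theorem pvB_eq (gt : List Int) :
    get_sound_event_indices_alt gt = 0 :: (pvBnd gt).map (fun (k : Nat) => (k : Int) + 1) := by
  cases gt with
  | nil => simp [get_sound_event_indices_alt, pvBnd]
  | cons x xs =>
      simp only [get_sound_event_indices_alt]
      rw [pvAltBnd xs x 1 0]
      norm_num

-- ===== VERDICT (by name: the statement is the Claim_ definition above) =====
theorem get_sound_event_indices_spec : Claim_equal_get_sound_event_indices := by
  intro gt _
  unfold Spec_get_sound_event_indices
  rw [pvA_eq, pvB_eq]
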